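-- pv_equiv track=rewrite | github.com/Michaszek224/praktykaiszeregowaniezadan | zadanie2/algorytmy2/155275/155275.py | lookahead_batching
-- ===== SOURCE A (Python) =====
-- def calculate_total_delay(machines, p, r, w):
--     total = 0
--     for m in range(4):
--         t = 0
--         for j in machines[m]:
--             start = max(t, r[j])
--             finish = start + p[j]
--             F = max(0, finish - r[j])
--             total += w[j] * F
--             t = finish
--     return total
--
-- def lookahead_batching(n, p, r, w):
--     jobs = sorted(range(n), key=lambda j: r[j])
--
--     machines = [[], [], [], []]
--     machine_time = [0, 0, 0, 0]
--
--     for job in jobs: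
--         best_m = None
--         best_finish = float("inf")
--
--         for m in range(4):
--             start = max(machine_time[m], r[job])
--             finish = start + p[job]
--             if finish < best_finish:
--                 best_finish = finish
--                 best_m = m
--
--         machines[best_m].append(job)
--         machine_time[best_m] = best_finish
--
--     total_delay = calculate_total_delay(machines, p, r, w)
--     return total_delay, machines
-- ===== SOURCE B (Python) =====
-- def lookahead_batching(n, p, r, w):
--     jobs = sorted(range(n), key=lambda j: r[j])
--
--     machines = [[], [], [], []]
--     machine_time = [0, 0, 0, 0]
--     total = 0
--
--     for job in jobs:
--         finishes = [max(t, r[job]) + p[job] for t in machine_time]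
--         best_finish = min(finishes)
--         best_m = finishes.index(best_finish)
--
--         machines[best_m].append(job)
--         machine_time[best_m] = best_finish
--         total += w[job] * max(0, best_finish - r[job])
--
--     return total, machines
-- ===== Notes on version B (the rewrite author's own statement) =====
-- stated objective: simpler
-- what changed: Single fused pass: the per-job weighted delay is accumulated during the assignment loop (so the calculate_total_delay replay helper disappears), and the best machine is chosen via a finishes comprehension with min/index instead of a hand-rolled best-tracking loop with an infinity sentinel.
import Mathlib
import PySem

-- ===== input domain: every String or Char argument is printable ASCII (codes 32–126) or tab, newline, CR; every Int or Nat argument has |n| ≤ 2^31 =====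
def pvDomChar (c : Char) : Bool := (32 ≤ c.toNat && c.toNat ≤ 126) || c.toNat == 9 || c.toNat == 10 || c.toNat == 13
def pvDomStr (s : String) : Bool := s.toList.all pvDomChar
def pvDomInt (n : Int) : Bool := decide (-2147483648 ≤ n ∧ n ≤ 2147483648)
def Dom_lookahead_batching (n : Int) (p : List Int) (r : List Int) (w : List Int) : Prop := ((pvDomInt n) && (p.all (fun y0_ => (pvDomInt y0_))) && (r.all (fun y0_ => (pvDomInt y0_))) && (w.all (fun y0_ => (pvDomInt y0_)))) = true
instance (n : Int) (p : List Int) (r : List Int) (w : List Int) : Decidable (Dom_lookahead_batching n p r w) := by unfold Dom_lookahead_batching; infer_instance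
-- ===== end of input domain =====

-- B fuses the delay accumulation into the assignment loop and picks the best machine via
-- a finishes list with min/first-index instead of A's best-tracking loop; objective: simpler.
-- Indexing uses pyGetD/pySetD, exact whenever the Python index is in range (Pre_ guarantees that).

-- ===== PORT A =====
-- body of the inner loop of calculate_total_delay; state = (t, total)
def calcInner (p r w : List Int) (st : Int × Int) (j : Int) : Int × Int :=
  let start := max st.1 (PySem.List.pyGetD r j 0)
  let finish := start + PySem.List.pyGetD p j 0
  let F := max 0 (finish - PySem.List.pyGetD r j 0)
  (finish, st.2 + PySem.List.pyGetD w j 0 * F)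

def calculate_total_delay (machines : List (List Int)) (p r w : List Int) : Int :=
  (PySem.List.pyRange 0 4 1).foldl (fun total m =>
    ((PySem.List.pyGetD machines m []).foldl (calcInner p r w) (0, total)).2) 0

-- the inner 'for m in range(4)' loop of A; state = (best_finish, best_m), none = float("inf") / None
def aSelect (machine_time : List Int) (rj pj : Int) : Option Int × Option Int :=
  (PySem.List.pyRange 0 4 1).foldl (fun (b : Option Int × Option Int) m =>
    let start := max (PySem.List.pyGetD machine_time m 0) rj
    let finish := start + pj
    match b.1 with
    | none => (some finish, some m)
    | some bf => if finish < bf then (some finish, some m) else b) (none, none)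

-- one iteration of A's main loop
def aStep (p r : List Int) (st : List (List Int) × List Int) (job : Int) : List (List Int) × List Int :=
  let sel := aSelect st.2 (PySem.List.pyGetD r job 0) (PySem.List.pyGetD p job 0)
  let best_finish := sel.1.getD 0   -- always some: range(4) is nonempty
  let best_m := sel.2.getD 0
  (PySem.List.pySetD st.1 best_m ((PySem.List.pyGetD st.1 best_m []) ++ [job]),
   PySem.List.pySetD st.2 best_m best_finish)

def lookahead_batching (n : Int) (p : List Int) (r : List Int) (w : List Int) : Int × List (List Int) :=
  let jobs := PySem.List.sorted (PySem.List.pyRange 0 n 1) (fun j => PySem.List.pyGetD r j 0) false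
  let st := jobs.foldl (aStep p r) ([[], [], [], []], [0, 0, 0, 0])
  (calculate_total_delay st.1 p r w, st.1)

-- ===== PORT B =====
-- B's selection: finishes comprehension, min, first index of the min
def bSel (machine_time : List Int) (rj pj : Int) : Int × Int :=
  let finishes := machine_time.map (fun t => max t rj + pj)
  let best_finish := (PySem.List.min? finishes (fun x => x)).getD 0   -- always some: 4 machines
  let best_m : Int := (((PySem.List.index? finishes best_finish).getD 0 : Nat) : Int)
  (best_finish, best_m)

-- one iteration of B's fused loop; state = (machines, machine_time, total)
def bStep (p r w : List Int) (st : List (List Int) × List Int × Int) (job : Int) :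
    List (List Int) × List Int × Int :=
  let rj := PySem.List.pyGetD r job 0
  let sel := bSel st.2.1 rj (PySem.List.pyGetD p job 0)
  (PySem.List.pySetD st.1 sel.2 ((PySem.List.pyGetD st.1 sel.2 []) ++ [job]),
   PySem.List.pySetD st.2.1 sel.2 sel.1,
   st.2.2 + PySem.List.pyGetD w job 0 * max 0 (sel.1 - rj))

def lookahead_batching_alt (n : Int) (p : List Int) (r : List Int) (w : List Int) : Int × List (List Int) :=
  let jobs := PySem.List.sorted (PySem.List.pyRange 0 n 1) (fun j => PySem.List.pyGetD r j 0) false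
  let st := jobs.foldl (bStep p r w) ([[], [], [], []], [0, 0, 0, 0], 0)
  (st.2.2, st.1)

-- ===== PRECONDITION & SPEC =====
-- A indexes p[j], r[j], w[j] for every j in range(n): outside these bounds Python raises IndexError.
def Pre_lookahead_batching (n : Int) (p : List Int) (r : List Int) (w : List Int) : Prop :=
  n ≤ 0 ∨ (n ≤ (p.length : Int) ∧ n ≤ (r.length : Int) ∧ n ≤ (w.length : Int))
instance (n : Int) (p : List Int) (r : List Int) (w : List Int) : Decidable (Pre_lookahead_batching n p r w) := by unfold Pre_lookahead_batching; infer_instance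
def pvWitness_lookahead_batching : Int × List Int × List Int × List Int := (3, [4, 1, 2], [0, 0, 1], [2, 1, 1])

def Spec_lookahead_batching (n : Int) (p : List Int) (r : List Int) (w : List Int) (out : Int × List (List Int)) : Prop := out = lookahead_batching_alt n p r w
instance (n : Int) (p : List Int) (r : List Int) (w : List Int) (out : Int × List (List Int)) : Decidable (Spec_lookahead_batching n p r w out) := by unfold Spec_lookahead_batching; infer_instance

-- ===== CLAIM (what is proved, stated in full; the proofs are below) =====
def Claim_equal_lookahead_batching : Prop := ∀ (n : Int) (p : List Int) (r : List Int) (w : List Int), Dom_lookahead_batching n p r w → Pre_lookahead_batching n p r w → Spec_lookahead_batching n p r w (lookahead_batching n p r w)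

-- ===== LEMMAS AND PROOFS =====

-- replay of one machine's job list from t = 0: (final time, its delay contribution)
def replay (p r w : List Int) (l : List Int) : Int × Int := l.foldl (calcInner p r w) (0, 0)

-- the loop invariant tying B's running total to A's machine lists
def DelayInv (p r w : List Int) (ms : List (List Int)) (ts : List Int) (acc : Int) : Prop :=
  ∃ l0 l1 l2 l3, ms = [l0, l1, l2, l3] ∧
    ts = [(replay p r w l0).1, (replay p r w l1).1, (replay p r w l2).1, (replay p r w l3).1] ∧
    acc = (replay p r w l0).2 + (replay p r w l1).2 + (replay p r w l2).2 + (replay p r w l3).2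

lemma calcInner_shift (p r w : List Int) (l : List Int) : ∀ (t acc : Int),
    l.foldl (calcInner p r w) (t, acc) =
      ((l.foldl (calcInner p r w) (t, 0)).1, acc + (l.foldl (calcInner p r w) (t, 0)).2) := by
  induction l with
  | nil => intro t acc; simp
  | cons j tl ih =>
      intro t acc
      simp only [List.foldl_cons, calcInner]
      rw [ih (max t (PySem.List.pyGetD r j 0) + PySem.List.pyGetD p j 0)
            (acc + PySem.List.pyGetD w j 0 * max 0 (max t (PySem.List.pyGetD r j 0) + PySem.List.pyGetD p j 0 - PySem.List.pyGetD r j 0)),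
          ih (max t (PySem.List.pyGetD r j 0) + PySem.List.pyGetD p j 0)
            (0 + PySem.List.pyGetD w j 0 * max 0 (max t (PySem.List.pyGetD r j 0) + PySem.List.pyGetD p j 0 - PySem.List.pyGetD r j 0))]
      refine Prod.ext rfl ?_
      simp only
      ring

lemma replay_append (p r w : List Int) (l : List Int) (j : Int) :
    replay p r w (l ++ [j]) =
      ((max (replay p r w l).1 (PySem.List.pyGetD r j 0) + PySem.List.pyGetD p j 0),
       (replay p r w l).2 + PySem.List.pyGetD w j 0 *
         max 0 (max (replay p r w l).1 (PySem.List.pyGetD r j 0) + PySem.List.pyGetD p j 0 - PySem.List.pyGetD r j 0)) := by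
  simp [replay, List.foldl_append, calcInner]

-- first index of a value in a 4-element list, as an if-chain
lemma index4 (a b c d v : Int) : PySem.List.index? [a, b, c, d] v =
    if a = v then some 0 else if b = v then some 1 else if c = v then some 2 else if d = v then some 3 else none := by
  simp [PySem.List.index?_eq_idxOf?, List.idxOf?, List.findIdx?, List.findIdx?.go]

-- A's strict-min scan over the four machines picks the same (finish, machine) as B's min/first-index
set_option maxRecDepth 4000 in
lemma sel_eq (t0 t1 t2 t3 rj pj : Int) :
    ((aSelect [t0, t1, t2, t3] rj pj).1.getD 0, (aSelect [t0, t1, t2, t3] rj pj).2.getD 0)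
      = bSel [t0, t1, t2, t3] rj pj := by
  have h : PySem.List.pyRange 0 4 1 = [0, 1, 2, 3] := by decide
  unfold aSelect bSel
  rw [h]
  simp only [List.foldl_cons, List.foldl_nil, List.map, PySem.List.pyGetD_ofNat',
    List.getD_cons_zero, List.getD_cons_succ, PySem.List.min?_id_cons, index4]
  generalize max t0 rj + pj = f0
  generalize max t1 rj + pj = f1
  generalize max t2 rj + pj = f2
  generalize max t3 rj + pj = f3
  by_cases h1 : f1 < f0 <;> by_cases h2 : f2 < f1 <;> by_cases h2' : f2 < f0 <;>
    by_cases h3a : f3 < f2 <;> by_cases h3b : f3 < f1 <;> by_cases h3c : f3 < f0 <;>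
    (try simp only [h1, h2, h2', h3a, h3b, h3c, if_true, if_false]) <;>
    (first
      | omega
      | (refine Prod.ext (by simp only [Option.getD_some]; omega) ?_ ;
         simp only [Option.getD_some] ; split_ifs <;> simp <;> omega))

-- B's selection is (max t_m rj + pj, m) for one of the four machines
lemma sel_cases (t0 t1 t2 t3 rj pj : Int) :
    bSel [t0, t1, t2, t3] rj pj = (max t0 rj + pj, 0) ∨
    bSel [t0, t1, t2, t3] rj pj = (max t1 rj + pj, 1) ∨
    bSel [t0, t1, t2, t3] rj pj = (max t2 rj + pj, 2) ∨
    bSel [t0, t1, t2, t3] rj pj = (max t3 rj + pj, 3) := by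
  unfold bSel
  simp only [List.map, PySem.List.min?_id_cons, List.foldl_cons, List.foldl_nil, index4,
    Option.getD_some]
  generalize max t0 rj + pj = f0
  generalize max t1 rj + pj = f1
  generalize max t2 rj + pj = f2
  generalize max t3 rj + pj = f3
  split_ifs <;> simp [Prod.ext_iff] <;> omega

lemma step_eq (p r w : List Int) (ms : List (List Int)) (ts : List Int) (acc job : Int)
    (h : DelayInv p r w ms ts acc) :
    (bStep p r w (ms, ts, acc) job).1 = (aStep p r (ms, ts) job).1 ∧
    (bStep p r w (ms, ts, acc) job).2.1 = (aStep p r (ms, ts) job).2 ∧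
    DelayInv p r w (aStep p r (ms, ts) job).1 (aStep p r (ms, ts) job).2 (bStep p r w (ms, ts, acc) job).2.2 := by
  obtain ⟨l0, l1, l2, l3, hm, ht, ha⟩ := h
  subst hm; subst ht; subst ha
  have hsel := sel_eq (replay p r w l0).1 (replay p r w l1).1 (replay p r w l2).1 (replay p r w l3).1
      (PySem.List.pyGetD r job 0) (PySem.List.pyGetD p job 0)
  rcases sel_cases (replay p r w l0).1 (replay p r w l1).1 (replay p r w l2).1 (replay p r w l3).1
      (PySem.List.pyGetD r job 0) (PySem.List.pyGetD p job 0) with hc | hc | hc | hc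
  · rw [hc] at hsel
    have hbf := congrArg Prod.fst hsel
    have hbm := congrArg Prod.snd hsel
    simp only at hbf hbm
    unfold aStep bStep
    simp only [hbf, hbm, hc]
    refine ⟨trivial, trivial, ?_⟩
    refine ⟨l0 ++ [job], l1, l2, l3, rfl, ?_, ?_⟩
    · simp only [replay_append]
      rfl
    · simp only [replay_append]
      show _ = _ + _ + _ + _
      ring
  · rw [hc] at hsel
    have hbf := congrArg Prod.fst hsel
    have hbm := congrArg Prod.snd hsel
    simp only at hbf hbm
    unfold aStep bStep
    simp only [hbf, hbm, hc]
    refine ⟨trivial, trivial, ?_⟩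
    refine ⟨l0, l1 ++ [job], l2, l3, rfl, ?_, ?_⟩
    · simp only [replay_append]
      rfl
    · simp only [replay_append]
      show _ = _ + _ + _ + _
      ring
  · rw [hc] at hsel
    have hbf := congrArg Prod.fst hsel
    have hbm := congrArg Prod.snd hsel
    simp only at hbf hbm
    unfold aStep bStep
    simp only [hbf, hbm, hc]
    refine ⟨trivial, trivial, ?_⟩
    refine ⟨l0, l1, l2 ++ [job], l3, rfl, ?_, ?_⟩
    · simp only [replay_append]
      rfl
    · simp only [replay_append]
      show _ = _ + _ + _ + _
      ring
  · rw [hc] at hsel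
    have hbf := congrArg Prod.fst hsel
    have hbm := congrArg Prod.snd hsel
    simp only at hbf hbm
    unfold aStep bStep
    simp only [hbf, hbm, hc]
    refine ⟨trivial, trivial, ?_⟩
    refine ⟨l0, l1, l2, l3 ++ [job], rfl, ?_, ?_⟩
    · simp only [replay_append]
      rfl
    · simp only [replay_append]
      show _ = _ + _ + _ + _
      ring

lemma loop_eq (p r w : List Int) : ∀ (jobs : List Int) (ms : List (List Int)) (ts : List Int) (acc : Int),
    DelayInv p r w ms ts acc →
    (jobs.foldl (bStep p r w) (ms, ts, acc)).1 = (jobs.foldl (aStep p r) (ms, ts)).1 ∧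
    (jobs.foldl (bStep p r w) (ms, ts, acc)).2.1 = (jobs.foldl (aStep p r) (ms, ts)).2 ∧
    DelayInv p r w (jobs.foldl (aStep p r) (ms, ts)).1 (jobs.foldl (aStep p r) (ms, ts)).2
      (jobs.foldl (bStep p r w) (ms, ts, acc)).2.2 := by
  intro jobs
  induction jobs with
  | nil => intro ms ts acc h; exact ⟨rfl, rfl, h⟩
  | cons j tl ih =>
      intro ms ts acc h
      obtain ⟨h1, h2, h3⟩ := step_eq p r w ms ts acc j h
      simp only [List.foldl_cons]
      have : bStep p r w (ms, ts, acc) j =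
          ((aStep p r (ms, ts) j).1, (aStep p r (ms, ts) j).2, (bStep p r w (ms, ts, acc) j).2.2) := by
        exact Prod.ext h1 (Prod.ext h2 rfl)
      rw [this]
      exact ih _ _ _ h3

lemma shift2 (p r w : List Int) (l : List Int) (acc : Int) :
    (l.foldl (calcInner p r w) (0, acc)).2 = acc + (replay p r w l).2 := by
  rw [calcInner_shift]; rfl

lemma calc_total_eq (p r w : List Int) (l0 l1 l2 l3 : List Int) :
    calculate_total_delay [l0, l1, l2, l3] p r w =
      (replay p r w l0).2 + (replay p r w l1).2 + (replay p r w l2).2 + (replay p r w l3).2 := by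
  have h : PySem.List.pyRange 0 4 1 = [0, 1, 2, 3] := by decide
  have g0 : PySem.List.pyGetD [l0, l1, l2, l3] (0 : Int) ([] : List Int) = l0 := rfl
  have g1 : PySem.List.pyGetD [l0, l1, l2, l3] (1 : Int) ([] : List Int) = l1 := rfl
  have g2 : PySem.List.pyGetD [l0, l1, l2, l3] (2 : Int) ([] : List Int) = l2 := rfl
  have g3 : PySem.List.pyGetD [l0, l1, l2, l3] (3 : Int) ([] : List Int) = l3 := rfl
  unfold calculate_total_delay
  rw [h]
  simp only [List.foldl_cons, List.foldl_nil, g0, g1, g2, g3]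
  simp only [shift2]
  ring

-- ===== VERDICT (by name: the statement is the Claim_ definition above) =====
theorem lookahead_batching_spec : Claim_equal_lookahead_batching := by
  intro n p r w _ _
  unfold Spec_lookahead_batching lookahead_batching lookahead_batching_alt
  have hInv : DelayInv p r w [[], [], [], []] [0, 0, 0, 0] 0 := by
    exact ⟨[], [], [], [], rfl, rfl, rfl⟩
  obtain ⟨h1, h2, h3⟩ := loop_eq p r w
    (PySem.List.sorted (PySem.List.pyRange 0 n 1) (fun j => PySem.List.pyGetD r j 0) false)
    [[], [], [], []] [0, 0, 0, 0] 0 hInv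
  obtain ⟨l0, l1, l2, l3, hm, _, hacc⟩ := h3
  simp only []
  rw [h1]
  refine Prod.ext ?_ rfl
  simp only [hm] at hacc ⊢
  rw [calc_total_eq, hacc]
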